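-- pv_equiv track=rewrite | github.com/bosl95/Algorithm | out/production/Algorithm/test/11/01.py | solution
-- ===== SOURCE A (Python) =====
-- def solution(S):
--     if 'aaa' in S:
--         return -1
--     if S=='a' or S=='aa':
--         return 0
--     n = len(S)
--     if 'a' not in S:
--         return 2*(n+1)
--     ans = 0
--     S = 'x'+S+'x'
--     for i in range(1, n+2):
--         if S[i]=='a':
--             if S[i-1]!='a' and S[i+1]!='a':
--                 ans += 1
--         else:
--             if S[i-1]!='a':
--                 ans += 2
--     return ans
-- ===== SOURCE B (Python) =====
-- def solution(S):
--     if 'aaa' in S: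
--         return -1
--     if S == 'a' or S == 'aa':
--         return 0
--     # score per maximal run of 'a' / non-'a' characters of the padded string
--     P = 'x' + S + 'x'
--     total = 0
--     i = 0
--     while i < len(P):
--         j = i + 1
--         while j < len(P) and (P[j] == 'a') == (P[i] == 'a'):
--             j += 1
--         L = j - i
--         if P[i] == 'a':
--             if L == 1:
--                 total += 1
--         else:
--             total += 2 * (L - 1)
--         i = j
--     return total
-- ===== Notes on version B (the rewrite author's own statement) =====
-- stated objective: alternative
-- what changed: B replaces A's per-index scan (with left/right neighbour lookups into the padded string) by a two-pointer loop over maximal runs of 'a'/non-'a' characters, scoring each run as a whole (2*(L-1) for a non-'a' run, 1 for a lone 'a'), which also makes A's separate no-'a' guard unnecessary.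
import Mathlib
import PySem

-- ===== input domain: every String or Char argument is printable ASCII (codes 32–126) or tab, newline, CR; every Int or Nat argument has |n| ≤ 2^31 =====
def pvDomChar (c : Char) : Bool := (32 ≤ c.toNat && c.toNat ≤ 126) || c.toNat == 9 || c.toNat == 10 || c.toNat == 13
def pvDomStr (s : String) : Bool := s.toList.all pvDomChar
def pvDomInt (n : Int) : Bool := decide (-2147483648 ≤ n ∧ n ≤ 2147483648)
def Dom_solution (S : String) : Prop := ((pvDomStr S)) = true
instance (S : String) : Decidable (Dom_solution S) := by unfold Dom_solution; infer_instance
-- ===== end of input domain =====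

-- B scores the padded string per maximal run of 'a'/non-'a' characters instead of per index; same O(n), no speed claim.

-- ===== PORT A =====
def solution (S : String) : Int :=
  if PySem.Str.isIn "aaa" S then -1
  else if S == "a" || S == "aa" then 0
  else
    let n : Int := PySem.Str.len S
    if !(PySem.Str.isIn "a" S) then 2 * (n + 1)
    else
      let P : List Char := 'x' :: S.toList ++ ['x']
      (PySem.List.pyRange 1 (n + 2) 1).foldl (fun ans i =>
        if PySem.List.pyGetD P i ' ' == 'a' then
          if PySem.List.pyGetD P (i - 1) ' ' != 'a' && PySem.List.pyGetD P (i + 1) ' ' != 'a'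
            then ans + 1 else ans
        else
          if PySem.List.pyGetD P (i - 1) ' ' != 'a' then ans + 2 else ans) 0

-- ===== PORT B =====
-- outer while-loop of Source B: consume one maximal run per step (inner while = takeWhile/dropWhile)
def pvRuns (l : List Char) : Int :=
  match l with
  | [] => 0
  | c :: rest =>
    let run := rest.takeWhile (fun d => (d == 'a') == (c == 'a'))
    let rest' := rest.dropWhile (fun d => (d == 'a') == (c == 'a'))
    (if c == 'a' then (if run.length == 0 then (1 : Int) else 0) else 2 * (run.length : Int))
      + pvRuns rest'
termination_by l.length
decreasing_by
  simp only [List.length_cons]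
  exact Nat.lt_succ_of_le (List.length_dropWhile_le _ _)

def solution_alt (S : String) : Int :=
  if PySem.Str.isIn "aaa" S then -1
  else if S == "a" || S == "aa" then 0
  else pvRuns ('x' :: S.toList ++ ['x'])

-- ===== PRECONDITION & SPEC =====
def Spec_solution (S : String) (out : Int) : Prop := out = solution_alt S
instance (S : String) (out : Int) : Decidable (Spec_solution S out) := by unfold Spec_solution; infer_instance

-- ===== CLAIM (what is proved, stated in full; the proofs are below) =====
def Claim_equal_solution : Prop := ∀ (S : String), Dom_solution S → Spec_solution S (solution S)

-- ===== LEMMAS AND PROOFS =====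

-- structural version of A's indexed loop: prev = previous char, lookahead headD ' ' = A's out-of-range default
def pvScore (prev : Char) : List Char → Int
  | [] => 0
  | c :: rest =>
    (if c == 'a' then
       (if prev != 'a' && (rest.headD ' ') != 'a' then (1 : Int) else 0)
     else
       (if prev != 'a' then 2 else 0)) + pvScore c rest

lemma pvLoopA (ys : List Char) : ∀ (prev : Char) (k : Nat) (P : List Char),
    P.drop k = prev :: ys → ∀ (acc : Int),
    (PySem.List.pyRange ((k : Int) + 1) (P.length : Int) 1).foldl (fun ans i =>
        if PySem.List.pyGetD P i ' ' == 'a' then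
          if PySem.List.pyGetD P (i - 1) ' ' != 'a' && PySem.List.pyGetD P (i + 1) ' ' != 'a'
            then ans + 1 else ans
        else
          if PySem.List.pyGetD P (i - 1) ' ' != 'a' then ans + 2 else ans) acc
      = acc + pvScore prev ys := by
  induction ys with
  | nil =>
    intro prev k P h acc
    have hlen : P.length = k + 1 := by
      have := congrArg List.length h
      simp [List.length_drop] at this
      omega
    rw [PySem.List.pyRange_one_eq_nil (by omega : (P.length : Int) ≤ (k : Int) + 1)]
    simp [pvScore]
  | cons c rest ih =>
    intro prev k P h acc
    have hlen : P.length = k + 2 + rest.length := by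
      have := congrArg List.length h
      simp [List.length_drop] at this
      omega
    have hk1 : P.drop (k + 1) = c :: rest := by
      have : P.drop (k + 1) = (P.drop k).drop 1 := by
        rw [List.drop_drop]
      rw [this, h]; rfl
    have hPk : P[k]? = some prev := by
      rw [← List.head?_drop, h]; rfl
    have hPk1 : P[k + 1]? = some c := by
      rw [← List.head?_drop, hk1]; rfl
    have hPk2 : P[k + 2]? = rest.head? := by
      rw [← List.head?_drop]
      have : P.drop (k + 2) = (P.drop (k + 1)).drop 1 := by rw [List.drop_drop]
      rw [this, hk1]
      rfl
    have gk : PySem.List.pyGetD P ((k : Int)) ' ' = prev := by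
      rw [PySem.List.pyGetD_natCast]
      simp [List.getD, hPk]
    have gk1 : PySem.List.pyGetD P ((k : Int) + 1) ' ' = c := by
      have e : ((k : Int) + 1) = ((k + 1 : Nat) : Int) := by push_cast; ring
      rw [e, PySem.List.pyGetD_natCast]
      simp [List.getD, hPk1]
    have gk2 : PySem.List.pyGetD P ((k : Int) + 2) ' ' = rest.headD ' ' := by
      have e : ((k : Int) + 2) = ((k + 2 : Nat) : Int) := by push_cast; ring
      rw [e, PySem.List.pyGetD_natCast]
      simp [List.getD, hPk2, List.headD_eq_head?_getD]
    have hcons : PySem.List.pyRange ((k : Int) + 1) (P.length : Int) 1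
        = ((k : Int) + 1) :: PySem.List.pyRange ((k : Int) + 2) (P.length : Int) 1 := by
      have h1 := PySem.List.pyRange_one_cons (a := (k : Int) + 1) (b := (P.length : Int))
        (by rw [hlen]; push_cast; omega)
      rw [h1]; ring_nf
    rw [hcons]
    simp only [List.foldl_cons]
    have harith : (k : Int) + 1 - 1 = (k : Int) := by ring
    have harith2 : (k : Int) + 1 + 1 = (k : Int) + 2 := by ring
    rw [harith, harith2, gk, gk1, gk2]
    have := ih c (k + 1) P hk1
    have hcast : ((k + 1 : Nat) : Int) + 1 = (k : Int) + 2 := by push_cast; ring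
    rw [hcast] at this
    rw [this]
    simp only [pvScore]
    split_ifs <;> ring

-- a run of non-'a' chars after a non-'a' prev scores 2 per char
lemma pvScore_noA (l : List Char) : ∀ (prev : Char), (prev == 'a') = false →
    (∀ c ∈ l, (c == 'a') = false) → pvScore prev l = 2 * (l.length : Int) := by
  induction l with
  | nil => intro prev _ _; simp [pvScore]
  | cons c rest ih =>
    intro prev hp hall
    have hc : (c == 'a') = false := hall c (by simp)
    simp only [pvScore, hc]
    rw [ih c hc (fun d hd => hall d (by simp [hd]))]
    simp [hp, bne]
    omega

-- unfold lemmas for the run recursion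
lemma pvRuns_nil : pvRuns [] = 0 := by rw [pvRuns]

lemma pvRuns_cons (c : Char) (rest : List Char) :
    pvRuns (c :: rest) =
      (if c == 'a' then
         (if (rest.takeWhile (fun d => (d == 'a') == (c == 'a'))).length == 0 then (1 : Int) else 0)
       else 2 * ((rest.takeWhile (fun d => (d == 'a') == (c == 'a'))).length : Int))
      + pvRuns (rest.dropWhile (fun d => (d == 'a') == (c == 'a'))) := by
  rw [pvRuns]

-- the core correspondence: A's per-char scoring = B's per-run scoring
lemma pvMain : ∀ (n : Nat) (l : List Char), l.length ≤ n →
    ((∀ prev, (prev == 'a') = false → pvScore prev l = pvRuns (prev :: l)) ∧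
      pvScore 'a' l = pvRuns (l.dropWhile (· == 'a'))) := by
  intro n
  induction n with
  | zero =>
    intro l hl
    have hnil : l = [] := List.length_eq_zero_iff.mp (Nat.le_zero.mp hl)
    subst hnil
    refine ⟨fun prev hp => ?_, by simp [pvScore, pvRuns_nil]⟩
    rw [pvRuns_cons]
    simp [pvScore, hp, pvRuns_nil]
  | succ m ih =>
    intro l hl
    match l with
    | [] =>
      refine ⟨fun prev hp => ?_, by simp [pvScore, pvRuns_nil]⟩
      rw [pvRuns_cons]
      simp [pvScore, hp, pvRuns_nil]
    | c :: rest =>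
      have hrest : rest.length ≤ m := by simp at hl; omega
      by_cases hc : (c == 'a') = true
      · -- first char is 'a'
        have hceq : c = 'a' := by simpa using hc
        subst hceq
        have key : pvScore 'a' rest = pvRuns (rest.dropWhile (· == 'a')) := (ih rest hrest).2
        constructor
        · intro prev hp
          rw [pvRuns_cons]
          have htw0 : ('a' :: rest).takeWhile (fun d => (d == 'a') == (prev == 'a')) = [] := by
            rw [hp]; simp
          have hdw0 : ('a' :: rest).dropWhile (fun d => (d == 'a') == (prev == 'a')) = 'a' :: rest := by
            rw [hp]; simp
          rw [htw0, hdw0]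
          simp only [hp, Bool.false_eq_true, if_false, List.length_nil, Nat.cast_zero, mul_zero,
            zero_add]
          rw [pvRuns_cons]
          simp only [beq_self_eq_true, beq_true, if_true]
          cases rest with
          | nil =>
            simp [pvScore, pvRuns_nil, hp, bne]
          | cons d r2 =>
            have hr2 : r2.length ≤ m := by simp at hrest ⊢; omega
            by_cases hd : (d == 'a') = true
            · have hdeq : d = 'a' := by simpa using hd
              subst hdeq
              have key2 : pvScore 'a' r2 = pvRuns (r2.dropWhile (· == 'a')) := (ih r2 hr2).2
              simp only [List.takeWhile_cons, List.dropWhile_cons, beq_self_eq_true, if_true,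
                List.length_cons]
              simp [pvScore, bne, hp, key2]
            · have hd' : (d == 'a') = false := by simpa using hd
              have key1 : pvScore d r2 = pvRuns (d :: r2) := (ih r2 hr2).1 d hd'
              simp only [List.takeWhile_cons, List.dropWhile_cons, hd, Bool.false_eq_true,
                if_false, List.length_nil]
              simp [pvScore, bne, hp, hd', key1]
        · -- prev = 'a': drop the leading 'a' on both sides
          have lhs : pvScore 'a' ('a' :: rest) = pvScore 'a' rest := by
            simp [pvScore, bne]
          have rhs : ('a' :: rest).dropWhile (· == 'a') = rest.dropWhile (· == 'a') := by
            simp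
          rw [lhs, rhs]
          exact key
      · -- first char is not 'a'
        have hc' : (c == 'a') = false := by simpa using hc
        constructor
        · intro prev hp
          have hfun : (fun d : Char => (d == 'a') == (prev == 'a'))
              = (fun d : Char => (d == 'a') == (c == 'a')) := by rw [hp, hc']
          rw [pvRuns_cons, hfun]
          have hpc : ((c == 'a') == (c == 'a')) = true := by simp
          rw [List.takeWhile_cons, List.dropWhile_cons]
          simp only [hpc, if_true]
          have hkey : pvScore c rest = pvRuns (c :: rest) := (ih rest hrest).1 c hc'
          rw [pvRuns_cons] at hkey
          simp only [hc', Bool.false_eq_true, if_false] at hkey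
          simp only [pvScore, hc', Bool.false_eq_true, if_false, bne, hp, Bool.not_false, if_true,
            List.length_cons]
          rw [hkey]
          push_cast
          ring
        · have hdw : (c :: rest).dropWhile (· == 'a') = c :: rest := by
            simp [hc']
          rw [hdw]
          have : pvScore c rest = pvRuns (c :: rest) := (ih rest hrest).1 c hc'
          simp [pvScore, hc', bne, this]

lemma pvScore_eq_pvRuns (l : List Char) (prev : Char) (hp : (prev == 'a') = false) :
    pvScore prev l = pvRuns (prev :: l) :=
  ((pvMain l.length l le_rfl).1 prev hp)

lemma pvMem_of_isIn_false (S : String) (h : PySem.Str.isIn "a" S = false) :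
    ∀ c ∈ S.toList, (c == 'a') = false := by
  intro c hc
  by_contra hne
  have hceq : c = 'a' := by
    have : (c == 'a') = true := by revert hne; cases (c == 'a') <;> simp
    simpa using this
  subst hceq
  have hinf : ('a' :: []) <:+: S.toList := by
    obtain ⟨s, t, hst⟩ := List.append_of_mem hc
    exact ⟨s, t, by simp [hst]⟩
  have h' : PySem.Chars.isIn "a".toList S.toList = false := by simpa using h
  have htrue := (PySem.Chars.isIn_iff_infix ("a".toList) S.toList).mpr (by simpa using hinf)
  rw [h'] at htrue
  simp at htrue

-- ===== VERDICT (by name: the statement is the Claim_ definition above) =====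
theorem solution_spec : Claim_equal_solution := by
  intro S _
  unfold Spec_solution solution solution_alt
  by_cases h1 : PySem.Str.isIn "aaa" S = true
  · rw [if_pos h1, if_pos h1]
  · rw [if_neg h1, if_neg h1]
    by_cases h2 : (S == "a" || S == "aa") = true
    · rw [if_pos h2, if_pos h2]
    · rw [if_neg h2, if_neg h2]
      dsimp only
      have hloop : (PySem.List.pyRange 1 ((PySem.Str.len S) + 2) 1).foldl (fun ans i =>
          if PySem.List.pyGetD ('x' :: S.toList ++ ['x']) i ' ' == 'a' then
            if PySem.List.pyGetD ('x' :: S.toList ++ ['x']) (i - 1) ' ' != 'a' &&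
               PySem.List.pyGetD ('x' :: S.toList ++ ['x']) (i + 1) ' ' != 'a'
              then ans + 1 else ans
          else
            if PySem.List.pyGetD ('x' :: S.toList ++ ['x']) (i - 1) ' ' != 'a' then ans + 2 else ans) 0
          = pvScore 'x' (S.toList ++ ['x']) := by
        have hdrop : ('x' :: S.toList ++ ['x']).drop 0 = 'x' :: (S.toList ++ ['x']) := by simp
        have hmain := pvLoopA (S.toList ++ ['x']) 'x' 0 ('x' :: S.toList ++ ['x']) hdrop 0
        have hlen : (((('x' :: S.toList ++ ['x']) : List Char).length : Int)) = (PySem.Str.len S) + 2 := by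
          simp [PySem.Str.len]
          ring
        rw [hlen] at hmain
        simpa using hmain
      by_cases h3 : PySem.Str.isIn "a" S = true
      · have h3c : PySem.Chars.isIn ['a'] S.toList = true := by simpa using h3
        rw [if_neg (by simp [h3c])]
        rw [hloop, pvScore_eq_pvRuns _ 'x' (by decide)]
        simp [List.cons_append]
      · have h3' : PySem.Str.isIn "a" S = false := by simpa using h3
        have h3c : PySem.Chars.isIn ['a'] S.toList = false := by simpa using h3'
        rw [if_pos (by simp [h3c])]
        rw [List.cons_append, ← pvScore_eq_pvRuns _ 'x' (by decide)]
        have hall : ∀ c ∈ (S.toList ++ ['x']), (c == 'a') = false := by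
          intro c hc
          rcases List.mem_append.mp hc with hm | hm
          · exact pvMem_of_isIn_false S h3' c hm
          · simp at hm; subst hm; decide
        rw [pvScore_noA (S.toList ++ ['x']) 'x' (by decide) hall]
        simp [PySem.Str.len]
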